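-- pv_equiv track=rewrite | github.com/Fabinout/plint | vowels.py | intersperse
-- ===== SOURCE A (Python) =====
-- def intersperse(a, b):
--   if (len(a) == 0 or a[0] == ' ') and (len(b) == 0 or b[0] == ' '):
--     return []
--   if len(a) == 0 or a[0] == ' ':
--     return ["/", b[0]] + intersperse(a, b[1:])
--   if len(b) == 0 or b[0] == ' ':
--     return [a[0], "/"] + intersperse(a[1:], b)
--   return [a[0], b[0]] + intersperse(a[1:], b[1:])
-- ===== SOURCE B (Python) =====
-- def intersperse(a, b):
--   out = []
--   i = j = 0
--   while True:
--     ai = i < len(a) and a[i] != ' '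
--     bj = j < len(b) and b[j] != ' '
--     if not ai and not bj:
--       return out
--     if not ai:
--       out.append("/")
--       out.append(b[j])
--       j += 1
--     elif not bj:
--       out.append(a[i])
--       out.append("/")
--       i += 1
--     else:
--       out.append(a[i])
--       out.append(b[j])
--       i += 1
--       j += 1
-- ===== Notes on version B (the rewrite author's own statement) =====
-- stated objective: faster
-- what changed: Replaced the recursion that slices strings and concatenates fresh lists at every step by a single iterative two-pointer walk appending to one output list.
import Mathlib
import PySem

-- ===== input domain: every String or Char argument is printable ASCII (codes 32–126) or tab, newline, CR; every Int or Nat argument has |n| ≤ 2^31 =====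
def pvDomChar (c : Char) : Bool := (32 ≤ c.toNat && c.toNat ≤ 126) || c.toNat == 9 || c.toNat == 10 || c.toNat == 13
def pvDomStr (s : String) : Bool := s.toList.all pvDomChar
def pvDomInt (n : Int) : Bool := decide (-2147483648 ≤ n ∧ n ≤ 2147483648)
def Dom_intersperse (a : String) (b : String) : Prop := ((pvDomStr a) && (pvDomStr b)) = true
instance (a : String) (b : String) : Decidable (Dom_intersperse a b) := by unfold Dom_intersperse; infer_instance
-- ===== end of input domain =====

-- B replaces A's slicing recursion by an iterative two-pointer walk with one output accumulator (O(n) vs O(n^2)).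

-- ===== PORT A =====
-- literal port of A's recursion on the character lists; slices a[1:]/b[1:] are tails
def interA : List Char → List Char → List String
  | a, b =>
    if (a.length = 0 ∨ a.headD ' ' = ' ') then
      if (b.length = 0 ∨ b.headD ' ' = ' ') then []
      else "/" :: String.ofList [b.headD ' '] :: interA a b.tail
    else
      if (b.length = 0 ∨ b.headD ' ' = ' ') then
        String.ofList [a.headD ' '] :: "/" :: interA a.tail b
      else
        String.ofList [a.headD ' '] :: String.ofList [b.headD ' '] :: interA a.tail b.tail
  termination_by a b => a.length + b.length
  decreasing_by
  · rename_i h1 h2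
    have hb : b ≠ [] := by rintro rfl; exact h2 (Or.inl rfl)
    cases b with
    | nil => exact absurd rfl hb
    | cons x xs => simp
  · rename_i h1 h2
    have ha : a ≠ [] := by rintro rfl; exact h1 (Or.inl rfl)
    cases a with
    | nil => exact absurd rfl ha
    | cons x xs => simp
  · rename_i h1 h2
    have ha : a ≠ [] := by rintro rfl; exact h1 (Or.inl rfl)
    cases a with
    | nil => exact absurd rfl ha
    | cons x xs => simp; omega

def intersperse (a : String) (b : String) : List String := interA a.toList b.toList

-- ===== PORT B =====
-- literal port of B's while-loop: two indices i j, output appended at the back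
def interB (a b : List Char) (i j : Nat) (out : List String) : List String :=
  let ai := decide (i < a.length) && !(a.getD i ' ' == ' ')
  let bj := decide (j < b.length) && !(b.getD j ' ' == ' ')
  if !ai && !bj then out
  else if !ai then interB a b i (j+1) (out ++ ["/", String.ofList [b.getD j ' ']])
  else if !bj then interB a b (i+1) j (out ++ [String.ofList [a.getD i ' '], "/"])
  else interB a b (i+1) (j+1) (out ++ [String.ofList [a.getD i ' '], String.ofList [b.getD j ' ']])
  termination_by (a.length - i) + (b.length - j)
  decreasing_by
  · rename_i h1 h2
    have h1' : ¬((!(decide (i < a.length) && !(a.getD i ' ' == ' '))) && (!(decide (j < b.length) && !(b.getD j ' ' == ' ')))) = true := h1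
    have h2' : (!(decide (i < a.length) && !(a.getD i ' ' == ' '))) = true := h2
    rw [h2'] at h1'
    simp at h1'
    omega
  · rename_i h1 h2 h3
    have h2' : ¬(!(decide (i < a.length) && !(a.getD i ' ' == ' '))) = true := h2
    simp at h2'
    omega
  · rename_i h1 h2 h3
    have h2' : ¬(!(decide (i < a.length) && !(a.getD i ' ' == ' '))) = true := h2
    simp at h2'
    omega

def intersperse_alt (a : String) (b : String) : List String := interB a.toList b.toList 0 0 []

-- ===== PRECONDITION & SPEC =====
def Spec_intersperse (a : String) (b : String) (out : List String) : Prop := out = intersperse_alt a b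
instance (a : String) (b : String) (out : List String) : Decidable (Spec_intersperse a b out) := by unfold Spec_intersperse; infer_instance

-- ===== CLAIM (what is proved, stated in full; the proofs are below) =====
def Claim_equal_intersperse : Prop := ∀ (a : String) (b : String), Dom_intersperse a b → Spec_intersperse a b (intersperse a b)

-- ===== LEMMAS AND PROOFS =====

theorem cond_iff (a : List Char) (i : Nat) :
    ((decide (i < a.length) && !(a.getD i ' ' == ' ')) = false) ↔
      ((a.drop i).length = 0 ∨ (a.drop i).headD ' ' = ' ') := by
  by_cases h : i < a.length
  · simp [h]
    intro hc
    omega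
  · simp [h, List.getD_eq_getElem?_getD]

theorem cond_iff' (a : List Char) (i : Nat) :
    ((decide (i < a.length) && !(a.getD i ' ' == ' ')) = true) ↔
      ¬((a.drop i).length = 0 ∨ (a.drop i).headD ' ' = ' ') := by
  rw [← cond_iff]
  simp

theorem interB_eq (a b : List Char) (i j : Nat) (out : List String) :
    interB a b i j out = out ++ interA (a.drop i) (b.drop j) := by
  fun_induction interB a b i j out with
  | case1 i j out ai bj hc =>
    have h : ((!(decide (i < a.length) && !(a.getD i ' ' == ' '))) && (!(decide (j < b.length) && !(b.getD j ' ' == ' ')))) = true := hc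
    simp only [Bool.and_eq_true, Bool.not_eq_true'] at h
    have hA := (cond_iff a i).mp h.1
    have hB := (cond_iff b j).mp h.2
    rw [interA]
    rw [if_pos hA, if_pos hB]
    simp
  | case2 i j out ai bj hc1 hc2 ih =>
    have h1 : ¬((!(decide (i < a.length) && !(a.getD i ' ' == ' '))) && (!(decide (j < b.length) && !(b.getD j ' ' == ' ')))) = true := hc1
    have h2 : (!(decide (i < a.length) && !(a.getD i ' ' == ' '))) = true := hc2
    simp only [Bool.not_eq_true'] at h2
    have hA := (cond_iff a i).mp h2
    have hB : ¬((b.drop j).length = 0 ∨ (b.drop j).headD ' ' = ' ') := by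
      rw [← cond_iff']
      simp
      have h1' : a.length ≤ i ∨ a[i]?.getD ' ' = ' ' → j < b.length ∧ ¬b[j]?.getD ' ' = ' ' := by
        simpa using h1
      have h2' : i < a.length → a[i]?.getD ' ' = ' ' := by simpa using h2
      by_cases hi : i < a.length
      · exact h1' (Or.inr (h2' hi))
      · exact h1' (Or.inl (by omega))
    rw [ih]
    conv_rhs => rw [interA]
    rw [if_pos hA, if_neg hB]
    simp [List.tail_drop]
  | case3 i j out ai bj hc1 hc2 hc3 ih =>
    have h2 : ¬(!(decide (i < a.length) && !(a.getD i ' ' == ' '))) = true := hc2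
    have h3 : (!(decide (j < b.length) && !(b.getD j ' ' == ' '))) = true := hc3
    simp only [Bool.not_eq_true, Bool.not_eq_false'] at h2
    simp only [Bool.not_eq_true'] at h3
    have hA := (cond_iff' a i).mp h2
    have hB := (cond_iff b j).mp h3
    rw [ih]
    conv_rhs => rw [interA]
    rw [if_neg hA, if_pos hB]
    simp [List.tail_drop]
  | case4 i j out ai bj hc1 hc2 hc3 ih =>
    have h2 : ¬(!(decide (i < a.length) && !(a.getD i ' ' == ' '))) = true := hc2
    have h3 : ¬(!(decide (j < b.length) && !(b.getD j ' ' == ' '))) = true := hc3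
    simp only [Bool.not_eq_true, Bool.not_eq_false'] at h2 h3
    have hA := (cond_iff' a i).mp h2
    have hB := (cond_iff' b j).mp h3
    rw [ih]
    conv_rhs => rw [interA]
    rw [if_neg hA, if_neg hB]
    simp [List.tail_drop]

-- ===== VERDICT (by name: the statement is the Claim_ definition above) =====
theorem intersperse_spec : Claim_equal_intersperse := by
  intro a b _
  unfold Spec_intersperse intersperse intersperse_alt
  rw [interB_eq]
  simp
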